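-- pv_equiv track=rewrite | github.com/mijung-oh/Algo_python | Algo_SWEA/0216/11315_오목.py | isCol
-- ===== SOURCE A (Python) =====
-- def isCol(lst):
--     check = 0
--     for i in range(len(lst)):
--         for j in range(len(lst)):
--             if j+4 < len(lst) and lst[j][i] == 'o' and lst[j+1][i] == 'o' and lst[j+2][i] == 'o' and lst[j+3][i] == 'o' and lst[j+4][i] == 'o':
--                 check = 1
--                 break
--     if check:
--         return True
--     return False
-- ===== SOURCE B (Python) =====
-- def isCol(lst):
--     n = len(lst)
--     for i in range(n):
--         count = 0
--         for row in lst: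
--             if i < len(row) and row[i] == 'o':
--                 count += 1
--                 if count == 5:
--                     return True
--             else:
--                 count = 0
--     return False
-- ===== Notes on version B (the rewrite author's own statement) =====
-- stated objective: simpler
-- what changed: replaces the fixed 5-wide window test with five chained comparisons and a j+4 bound by a per-column running streak counter with early return
-- outside the precondition, e.g. on isCol([['x', 'x', 'x', 'x', 'x'], ['z'], ['z'], ['z'], ['z']]): A returns False, B returns False
import Mathlib
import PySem

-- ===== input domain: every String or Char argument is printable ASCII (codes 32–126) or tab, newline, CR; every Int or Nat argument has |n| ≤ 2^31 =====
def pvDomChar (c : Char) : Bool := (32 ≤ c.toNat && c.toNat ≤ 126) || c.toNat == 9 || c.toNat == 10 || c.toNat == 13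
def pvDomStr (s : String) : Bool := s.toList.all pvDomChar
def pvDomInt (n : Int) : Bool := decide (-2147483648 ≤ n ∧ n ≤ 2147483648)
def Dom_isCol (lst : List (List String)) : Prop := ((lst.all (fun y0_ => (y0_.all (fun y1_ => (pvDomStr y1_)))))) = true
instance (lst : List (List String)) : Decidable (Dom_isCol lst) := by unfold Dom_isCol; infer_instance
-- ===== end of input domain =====

-- B replaces A's fixed 5-wide window test (five chained comparisons under a j+4 bound)
-- by a per-column running streak counter with early return; same return value wherever A returns.


-- ===== PORT A =====
-- the if-condition of A's inner loop, literally (out-of-range access never happens inside Pre_; getD "" is exact there)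
def isColCond (lst : List (List String)) (n i j : Nat) : Bool :=
  decide (j + 4 < n) && ((lst.getD j []).getD i "" == "o") && ((lst.getD (j+1) []).getD i "" == "o")
    && ((lst.getD (j+2) []).getD i "" == "o") && ((lst.getD (j+3) []).getD i "" == "o")
    && ((lst.getD (j+4) []).getD i "" == "o")

-- inner 'for j' loop with its break (returns the updated check)
def isColInner (lst : List (List String)) (n i : Nat) : List Nat → Int → Int
  | [], check => check
  | j :: js, check => if isColCond lst n i j then 1 else isColInner lst n i js check

def isCol (lst : List (List String)) : Bool :=
  let n := lst.length
  let check := (List.range n).foldl (fun check i => isColInner lst n i (List.range n) check) (0 : Int)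
  if check ≠ 0 then true else false

-- ===== PORT B =====
-- inner 'for row' loop of B: running streak counter with early return
def isColStreak (i : Nat) : List (List String) → Nat → Bool
  | [], _ => false
  | row :: rest, count =>
    if decide (i < row.length) && (row.getD i "" == "o") then
      (if count + 1 == 5 then true else isColStreak i rest (count + 1))
    else isColStreak i rest 0

def isCol_alt (lst : List (List String)) : Bool :=
  (List.range lst.length).any (fun i => isColStreak i lst 0)

-- ===== PRECONDITION & SPEC =====
-- Pre_ excludes ragged grids (5 or more rows with some row shorter than the number of rows),
-- on which A's IndexError is data-dependent; on excluded inputs where A happens to return, B returns the same value.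
def Pre_isCol (lst : List (List String)) : Prop :=
  lst.length < 5 ∨ ∀ row ∈ lst, lst.length ≤ row.length
instance (lst : List (List String)) : Decidable (Pre_isCol lst) := by unfold Pre_isCol; infer_instance

def pvWitness_isCol : List (List String) := [["o","x"],["o","x"]]

def Spec_isCol (lst : List (List String)) (out : Bool) : Prop := out = isCol_alt lst
instance (lst : List (List String)) (out : Bool) : Decidable (Spec_isCol lst out) := by unfold Spec_isCol; infer_instance

-- ===== CLAIM (what is proved, stated in full; the proofs are below) =====
def Claim_equal_isCol : Prop := ∀ (lst : List (List String)), Dom_isCol lst → Pre_isCol lst → Spec_isCol lst (isCol lst)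

-- ===== LEMMAS AND PROOFS =====

-- cell i is in range and holds "o"
def goodCell (i : Nat) (row : List String) : Bool :=
  decide (i < row.length) && (row.getD i "" == "o")

lemma getD_eq_good (i : Nat) (row : List String) :
    (row.getD i "" == "o") = goodCell i row := by
  by_cases h : i < row.length
  · simp [goodCell, h]
  · have : row.getD i "" = "" := List.getD_eq_default _ _ (by omega)
    simp [goodCell, h]

lemma cond_iff (lst : List (List String)) (i j : Nat) :
    isColCond lst lst.length i j = true ↔
      j + 5 ≤ lst.length ∧ ∀ k < 5, goodCell i (lst.getD (j + k) []) = true := by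
  simp only [isColCond, getD_eq_good, Bool.and_eq_true, decide_eq_true_eq]
  constructor
  · rintro ⟨⟨⟨⟨⟨h, h0⟩, h1⟩, h2⟩, h3⟩, h4⟩
    refine ⟨by omega, ?_⟩
    intro k hk
    interval_cases k <;> simpa using ‹_›
  · rintro ⟨hn, hall⟩
    refine ⟨⟨⟨⟨⟨by omega, ?_⟩, ?_⟩, ?_⟩, ?_⟩, ?_⟩
    · simpa using hall 0 (by omega)
    · exact hall 1 (by omega)
    · exact hall 2 (by omega)
    · exact hall 3 (by omega)
    · exact hall 4 (by omega)

lemma innerA_eq (lst : List (List String)) (n i : Nat) (js : List Nat) (check : Int) :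
    isColInner lst n i js check = if js.any (fun j => isColCond lst n i j) then 1 else check := by
  induction js with
  | nil => simp [isColInner]
  | cons j js ih =>
    simp only [isColInner, List.any_cons]
    by_cases h : isColCond lst n i j = true <;> simp [h, ih]

lemma foldl_if_one (P : Nat → Bool) (l : List Nat) (c : Int) :
    l.foldl (fun c i => if P i then 1 else c) c = if l.any P then 1 else c := by
  induction l generalizing c with
  | nil => simp
  | cons x l ih =>
    simp only [List.foldl_cons, List.any_cons]
    by_cases h : P x = true <;> simp [h, ih]

lemma isCol_iff (lst : List (List String)) :
    isCol lst = true ↔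
      ∃ i < lst.length, ∃ j, j + 5 ≤ lst.length ∧
        ∀ k < 5, goodCell i (lst.getD (j + k) []) = true := by
  have hbody : (fun (check : Int) (i : Nat) => isColInner lst lst.length i (List.range lst.length) check)
      = fun check i => if (List.range lst.length).any (fun j => isColCond lst lst.length i j) then 1 else check := by
    funext check i; exact innerA_eq ..
  show (if ((List.range lst.length).foldl
        (fun check i => isColInner lst lst.length i (List.range lst.length) check) (0 : Int)) ≠ 0
      then true else false) = true ↔
      ∃ i < lst.length, ∃ j, j + 5 ≤ lst.length ∧
        ∀ k < 5, goodCell i (lst.getD (j + k) []) = true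
  rw [hbody, foldl_if_one]
  by_cases hA : (List.range lst.length).any
      (fun i => (List.range lst.length).any (fun j => isColCond lst lst.length i j)) = true
  · simp only [hA, if_true]
    simp only [List.any_eq_true, List.mem_range] at hA
    obtain ⟨i, hi, j, hj, hc⟩ := hA
    obtain ⟨hjn, hall⟩ := (cond_iff lst i j).mp hc
    simp only [ne_eq, one_ne_zero, not_false_eq_true, if_true, true_iff]
    exact ⟨i, hi, j, hjn, hall⟩
  · rw [if_neg hA]
    simp only [ne_eq]
    constructor
    · intro h; simp at h
    · rintro ⟨i, hi, j, hjn, hall⟩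
      exact absurd (by
        simp only [List.any_eq_true, List.mem_range]
        exact ⟨i, hi, j, by omega, (cond_iff lst i j).mpr ⟨hjn, hall⟩⟩) hA

lemma streak_iff (i : Nat) (rs : List (List String)) :
    ∀ c : Nat, c ≤ 4 →
    (isColStreak i rs c = true ↔
      (5 ≤ c + rs.length ∧ ∀ k < 5 - c, goodCell i (rs.getD k []) = true) ∨
      (∃ j, j + 5 ≤ rs.length ∧ ∀ k < 5, goodCell i (rs.getD (j + k) []) = true)) := by
  induction rs with
  | nil =>
    intro c hc
    simp only [isColStreak, List.length_nil]
    constructor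
    · intro h; cases h
    · rintro (⟨h, _⟩ | ⟨j, hj, _⟩) <;> omega
  | cons r rs ih =>
    intro c hc
    have hgood : (decide (i < r.length) && (r.getD i "" == "o")) = goodCell i r := rfl
    simp only [isColStreak, hgood, List.length_cons]
    by_cases hg : goodCell i r = true
    · rw [if_pos hg]
      by_cases hc4 : c = 4
      · subst hc4
        rw [if_pos (by decide)]
        constructor
        · intro _
          left
          refine ⟨by omega, ?_⟩
          intro k hk
          have hk0 : k = 0 := by omega
          subst hk0
          rw [List.getD_cons_zero]; exact hg
        · intro _; rfl
      · rw [if_neg (by simp only [beq_iff_eq]; omega)]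
        rw [ih (c + 1) (by omega)]
        constructor
        · rintro (⟨hlen, hall⟩ | ⟨j, hj, hall⟩)
          · left
            refine ⟨by omega, ?_⟩
            intro k hk
            cases k with
            | zero => rw [List.getD_cons_zero]; exact hg
            | succ k' => rw [List.getD_cons_succ]; exact hall k' (by omega)
          · right
            refine ⟨j + 1, by omega, ?_⟩
            intro k hk
            rw [show j + 1 + k = (j + k) + 1 by omega, List.getD_cons_succ]
            exact hall k hk
        · rintro (⟨hlen, hall⟩ | ⟨j, hj, hall⟩)
          · left
            refine ⟨by omega, ?_⟩
            intro k hk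
            have h := hall (k + 1) (by omega)
            rw [List.getD_cons_succ] at h
            exact h
          · cases j with
            | zero =>
              left
              refine ⟨by omega, ?_⟩
              intro k hk
              have h := hall (k + 1) (by omega)
              rw [show 0 + (k + 1) = k + 1 by omega, List.getD_cons_succ] at h
              exact h
            | succ j' =>
              right
              refine ⟨j', by omega, ?_⟩
              intro k hk
              have h := hall k hk
              rw [show j' + 1 + k = (j' + k) + 1 by omega, List.getD_cons_succ] at h
              exact h
    · rw [if_neg hg]
      rw [ih 0 (by omega)]
      constructor
      · rintro (⟨hlen, hall⟩ | ⟨j, hj, hall⟩)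
        · right
          refine ⟨1, by omega, ?_⟩
          intro k hk
          rw [show 1 + k = k + 1 by omega, List.getD_cons_succ]
          exact hall k (by omega)
        · right
          refine ⟨j + 1, by omega, ?_⟩
          intro k hk
          rw [show j + 1 + k = (j + k) + 1 by omega, List.getD_cons_succ]
          exact hall k hk
      · rintro (⟨hlen, hall⟩ | ⟨j, hj, hall⟩)
        · exfalso
          have h0 := hall 0 (by omega)
          rw [List.getD_cons_zero] at h0
          exact hg h0
        · cases j with
          | zero =>
            exfalso
            have h0 := hall 0 (by omega)
            rw [show (0:Nat) + 0 = 0 by omega, List.getD_cons_zero] at h0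
            exact hg h0
          | succ j' =>
            right
            refine ⟨j', by omega, ?_⟩
            intro k hk
            have h := hall k hk
            rw [show j' + 1 + k = (j' + k) + 1 by omega, List.getD_cons_succ] at h
            exact h

lemma isCol_alt_iff (lst : List (List String)) :
    isCol_alt lst = true ↔
      ∃ i < lst.length, ∃ j, j + 5 ≤ lst.length ∧
        ∀ k < 5, goodCell i (lst.getD (j + k) []) = true := by
  unfold isCol_alt
  simp only [List.any_eq_true, List.mem_range]
  constructor
  · rintro ⟨i, hi, hs⟩
    rcases (streak_iff i lst 0 (by omega)).mp hs with ⟨hlen, hall⟩ | hwin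
    · refine ⟨i, hi, 0, by omega, ?_⟩
      intro k hk
      rw [show (0:Nat) + k = k by omega]
      exact hall k (by omega)
    · exact ⟨i, hi, hwin⟩
  · rintro ⟨i, hi, hwin⟩
    exact ⟨i, hi, (streak_iff i lst 0 (by omega)).mpr (Or.inr hwin)⟩

lemma main_eq (lst : List (List String)) : isCol lst = isCol_alt lst := by
  have h := (isCol_iff lst).trans (isCol_alt_iff lst).symm
  cases ha : isCol lst <;> cases hb : isCol_alt lst <;> simp_all

-- ===== VERDICT (by name: the statement is the Claim_ definition above) =====
theorem isCol_spec : Claim_equal_isCol := by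
  intro lst _ _
  unfold Spec_isCol
  exact main_eq lst
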